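-- pv_equiv track=rewrite | github.com/Zebedee2021/lab-dashboard | scripts/process_data.py | normalize_project_name
-- ===== SOURCE A (Python) =====
-- def normalize_project_name(raw_name, alias_map, config):
--     """将原始项目名称归一化为标准项目ID"""
--     raw_lower = raw_name.lower().strip()
--     # 精确匹配
--     for alias, proj_id in alias_map.items():
--         if alias in raw_lower or raw_lower in alias:
--             return proj_id
--     # 模糊匹配（取前4字）
--     for alias, proj_id in alias_map.items():
--         if len(alias) >= 2 and alias[:2] in raw_lower:
--             return proj_id
--     return None
-- ===== SOURCE B (Python) =====
-- def normalize_project_name(raw_name, alias_map, config):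
--     """Rank every alias once (0 = exact/containment, 1 = fuzzy 2-char prefix,
--     2 = no match), keep the FIRST proj_id per rank in a dict, and answer with
--     the best rank present."""
--     raw_lower = raw_name.lower().strip()
--
--     def rank(alias):
--         if alias in raw_lower or raw_lower in alias:
--             return 0
--         if len(alias) >= 2 and alias[:2] in raw_lower:
--             return 1
--         return 2
--
--     best = {}
--     for alias, proj_id in alias_map.items():
--         r = rank(alias)
--         if r < 2 and r not in best:
--             best[r] = proj_id
--     return best.get(0, best.get(1))
-- ===== Notes on version B (the rewrite author's own statement) =====
-- stated objective: alternative
-- what changed: A's two sequential scans (exact then fuzzy) are replaced by one ranking pass that scores each alias 0/1/2 and records the first proj_id per rank in a dict, the answer being the best rank present; it trades A's early exit for a single full pass.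
import Mathlib
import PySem

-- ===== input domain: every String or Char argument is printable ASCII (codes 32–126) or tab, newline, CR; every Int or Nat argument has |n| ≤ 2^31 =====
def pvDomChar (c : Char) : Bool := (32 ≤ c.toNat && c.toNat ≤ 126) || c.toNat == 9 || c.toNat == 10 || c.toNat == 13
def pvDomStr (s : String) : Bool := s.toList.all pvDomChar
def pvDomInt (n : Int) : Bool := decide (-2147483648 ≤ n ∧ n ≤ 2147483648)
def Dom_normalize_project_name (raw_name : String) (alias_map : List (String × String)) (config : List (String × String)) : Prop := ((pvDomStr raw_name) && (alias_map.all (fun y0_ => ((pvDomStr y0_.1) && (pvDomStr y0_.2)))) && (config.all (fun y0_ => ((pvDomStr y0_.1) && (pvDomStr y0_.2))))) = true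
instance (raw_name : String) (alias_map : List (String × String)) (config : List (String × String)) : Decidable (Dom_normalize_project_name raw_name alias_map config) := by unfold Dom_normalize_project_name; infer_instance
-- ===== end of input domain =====

-- B replaces A's two sequential scans by one ranking pass: each alias is scored
-- 0 (exact/containment) / 1 (fuzzy 2-char prefix) / 2 (no match), the first
-- proj_id per rank is kept in a dict, and the best rank present is the answer
-- (objective: alternative decomposition, same cost).
-- alias_map is a Python dict passed as an association list; both ports iterate
-- PySem.Dict.ofList items, which is exactly 'for alias, proj_id in alias_map.items()'.

-- ===== PORT A =====
-- first loop of A: exact/containment match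
def npnLoop1 (items : List (String × String)) (raw_lower : String) : Option String :=
  match items with
  | [] => none
  | (al, proj_id) :: rest =>
    if PySem.Str.isIn al raw_lower || PySem.Str.isIn raw_lower al then some proj_id
    else npnLoop1 rest raw_lower

-- second loop of A: fuzzy match on al[:2] (al[:2] with a nonnegative stop = take 2, exact)
def npnLoop2 (items : List (String × String)) (raw_lower : String) : Option String :=
  match items with
  | [] => none
  | (al, proj_id) :: rest =>
    if 2 ≤ al.toList.length && PySem.Str.isIn (String.mk (al.toList.take 2)) raw_lower then some proj_id
    else npnLoop2 rest raw_lower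

def normalize_project_name (raw_name : String) (alias_map : List (String × String)) (config : List (String × String)) : Option String :=
  let raw_lower := PySem.Str.strip (PySem.Str.lower raw_name)
  let items := (PySem.Dict.ofList alias_map).items
  match npnLoop1 items raw_lower with
  | some proj_id => some proj_id
  | none => npnLoop2 items raw_lower

-- ===== PORT B =====
-- Source B's rank(alias): 0 exact/containment, 1 fuzzy prefix, 2 otherwise
def npnRank (raw_lower al : String) : Nat :=
  if PySem.Str.isIn al raw_lower || PySem.Str.isIn raw_lower al then 0
  else if 2 ≤ al.toList.length && PySem.Str.isIn (String.mk (al.toList.take 2)) raw_lower then 1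
  else 2

-- Source B's loop: best[r] = proj_id for the first alias of each rank r < 2
def npnBuild (items : List (String × String)) (raw_lower : String) (best : PySem.Dict Nat String) : PySem.Dict Nat String :=
  match items with
  | [] => best
  | (al, proj_id) :: rest =>
    let r := npnRank raw_lower al
    npnBuild rest raw_lower (if r < 2 ∧ best.contains r = false then best.insert r proj_id else best)

-- best.get(0, best.get(1))
def normalize_project_name_alt (raw_name : String) (alias_map : List (String × String)) (config : List (String × String)) : Option String :=
  let raw_lower := PySem.Str.strip (PySem.Str.lower raw_name)
  let best := npnBuild ((PySem.Dict.ofList alias_map).items) raw_lower PySem.Dict.empty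
  match best.get? 0 with
  | some p => some p
  | none => best.get? 1

-- ===== PRECONDITION & SPEC =====
def Spec_normalize_project_name (raw_name : String) (alias_map : List (String × String)) (config : List (String × String)) (out : Option String) : Prop := out = normalize_project_name_alt raw_name alias_map config
instance (raw_name : String) (alias_map : List (String × String)) (config : List (String × String)) (out : Option String) : Decidable (Spec_normalize_project_name raw_name alias_map config out) := by unfold Spec_normalize_project_name; infer_instance

-- ===== CLAIM =====
def Claim_equal_normalize_project_name : Prop := ∀ (raw_name : String) (alias_map : List (String × String)) (config : List (String × String)), Dom_normalize_project_name raw_name alias_map config → Spec_normalize_project_name raw_name alias_map config (normalize_project_name raw_name alias_map config)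

-- ===== LEMMAS AND PROOFS =====
-- first proj_id whose alias has rank r
def npnFirst (r : Nat) (items : List (String × String)) (rl : String) : Option String :=
  match items with
  | [] => none
  | (al, p) :: rest => if npnRank rl al = r then some p else npnFirst r rest rl

theorem npnLoop1_eq_first (items : List (String × String)) (rl : String) :
    npnLoop1 items rl = npnFirst 0 items rl := by
  induction items with
  | nil => rfl
  | cons hd tl ih =>
    obtain ⟨al, p⟩ := hd
    by_cases h : (PySem.Str.isIn al rl || PySem.Str.isIn rl al) = true
    · have hr : npnRank rl al = 0 := by unfold npnRank; rw [if_pos h]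
      simp only [npnLoop1, npnFirst, hr, if_pos h, if_true]
    · have hr : ¬ npnRank rl al = 0 := by
        unfold npnRank; rw [if_neg h]; split <;> simp
      simp only [npnLoop1, npnFirst, if_neg h, if_neg hr, ih]

theorem npnLoop2_eq_first (items : List (String × String)) (rl : String)
    (h1 : npnLoop1 items rl = none) :
    npnLoop2 items rl = npnFirst 1 items rl := by
  induction items with
  | nil => rfl
  | cons hd tl ih =>
    obtain ⟨al, p⟩ := hd
    simp only [npnLoop1] at h1
    by_cases h : (PySem.Str.isIn al rl || PySem.Str.isIn rl al) = true
    · rw [if_pos h] at h1; exact absurd h1 (by simp)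
    · rw [if_neg h] at h1
      by_cases h2 : (2 ≤ al.toList.length && PySem.Str.isIn (String.mk (al.toList.take 2)) rl) = true
      · have hr : npnRank rl al = 1 := by unfold npnRank; rw [if_neg h, if_pos h2]
        simp only [npnLoop2, npnFirst, hr, if_pos h2, if_true]
      · have hr : ¬ npnRank rl al = 1 := by
          unfold npnRank; rw [if_neg h, if_neg h2]; simp
        simp only [npnLoop2, npnFirst, if_neg h2, if_neg hr, ih h1]

theorem npnBuild_get (items : List (String × String)) (rl : String)
    (d : PySem.Dict Nat String) (r : Nat) (hr : r < 2) :
    (npnBuild items rl d).get? r =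
      match d.get? r with
      | some v => some v
      | none => npnFirst r items rl := by
  induction items generalizing d with
  | nil => cases h : d.get? r <;> simp [npnBuild, npnFirst, h]
  | cons hd tl ih =>
    obtain ⟨al, p⟩ := hd
    simp only [npnBuild, npnFirst]
    by_cases hc : (npnRank rl al < 2 ∧ d.contains (npnRank rl al) = false)
    · rw [if_pos hc, ih]
      by_cases he : npnRank rl al = r
      · subst he
        have hd0 : d.get? (npnRank rl al) = none := by
          rw [PySem.Dict.get?_eq_none_iff_contains, hc.2]
        rw [hd0, PySem.Dict.get?_insert_self, if_pos rfl]
      · rw [PySem.Dict.get?_insert_of_ne d p (Ne.symm he), if_neg he]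
    · rw [if_neg hc, ih]
      by_cases he : npnRank rl al = r
      · subst he
        have hcon : d.contains (npnRank rl al) = true := by
          rcases Bool.eq_false_or_eq_true (d.contains (npnRank rl al)) with h | h
          · exact h
          · exact absurd ⟨hr, h⟩ hc
        obtain ⟨v, hv⟩ : ∃ v, d.get? (npnRank rl al) = some v := by
          cases h : d.get? (npnRank rl al) with
          | none => rw [PySem.Dict.get?_eq_none_iff_contains] at h; rw [h] at hcon; cases hcon
          | some v => exact ⟨v, rfl⟩
        rw [hv]
      · rw [if_neg he]

theorem npnMain (items : List (String × String)) (rl : String) :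
    (match npnLoop1 items rl with
     | some p => some p
     | none => npnLoop2 items rl) =
      (match (npnBuild items rl PySem.Dict.empty).get? 0 with
       | some p => some p
       | none => (npnBuild items rl PySem.Dict.empty).get? 1) := by
  rw [npnBuild_get _ _ _ 0 (by omega), npnBuild_get _ _ _ 1 (by omega),
    PySem.Dict.get?_empty, PySem.Dict.get?_empty, npnLoop1_eq_first]
  cases h0 : npnFirst 0 items rl with
  | some p => rfl
  | none => rw [npnLoop2_eq_first _ _ (by rw [npnLoop1_eq_first, h0])]

-- ===== VERDICT =====
theorem normalize_project_name_spec : Claim_equal_normalize_project_name := by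
  intro raw_name alias_map config _
  exact npnMain ((PySem.Dict.ofList alias_map).items) (PySem.Str.strip (PySem.Str.lower raw_name))
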